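-- pv_equiv track=rewrite | github.com/xu1718191411/AT_CODE_BEGINNER_SELECTION | CONTEXT_26/c.py | dfs
-- ===== SOURCE A (Python) =====
-- import math
--
-- def dfs(currentIndex, links):
--     if len(links[currentIndex]) == 0:
--         return 1
--
--     maxValue = -math.inf
--     minValue = math.inf
--     childrens = links[currentIndex]
--
--     for child in childrens:
--         value = dfs(child,links)
--         maxValue = max(maxValue, value)
--         minValue = min(minValue, value)
--
--
--     return minValue + maxValue + 1
-- ===== SOURCE B (Python) =====
-- def dfs(currentIndex, links):
--     # Top-down dynamic programming: memoise each node's value so every node is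
--     # solved once (a leaf is worth 1, an inner node min + max of child values + 1).
--     memo = {}
--
--     def value(i):
--         if i not in memo:
--             vals = [value(c) for c in links[i]]
--             memo[i] = min(vals) + max(vals) + 1 if vals else 1
--         return memo[i]
--
--     return value(currentIndex)
-- ===== Notes on version B (the rewrite author's own statement) =====
-- stated objective: faster
-- what changed: Replaces the naive recursion (which re-solves shared children exponentially often on DAGs) by top-down dynamic programming with a node->value memo table, each node solved once.
import Mathlib
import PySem

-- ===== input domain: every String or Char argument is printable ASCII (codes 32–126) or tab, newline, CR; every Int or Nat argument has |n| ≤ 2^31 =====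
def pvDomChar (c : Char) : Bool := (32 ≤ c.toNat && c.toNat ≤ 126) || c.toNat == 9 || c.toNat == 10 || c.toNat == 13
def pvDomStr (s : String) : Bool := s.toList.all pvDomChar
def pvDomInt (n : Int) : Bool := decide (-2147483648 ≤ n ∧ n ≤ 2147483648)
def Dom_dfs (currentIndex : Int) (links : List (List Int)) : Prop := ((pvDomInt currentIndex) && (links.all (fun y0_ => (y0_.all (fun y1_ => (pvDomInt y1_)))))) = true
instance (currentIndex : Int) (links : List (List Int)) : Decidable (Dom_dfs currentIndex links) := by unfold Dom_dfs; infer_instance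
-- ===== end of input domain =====

-- B replaces A's naive recursion by top-down dynamic programming with a memo table (each node solved once).

-- ===== PORT A =====
-- A's loop body: update the (maxValue, minValue) pair; 'none' models the (-inf, inf) start
def aUpd (st : Option (Int × Int)) (value : Int) : Option (Int × Int) :=
  match st with
  | none => some (value, value)
  | some (mx, mn) => some (max mx value, min mn value)

-- A's recursion totalised with fuel (a guard only; under Pre_ the fuel links.length + 1 is never exhausted).
def dfsFuel (links : List (List Int)) : Nat → Int → Option Int
  | 0, _ => none
  | fuel+1, i =>
    match PySem.List.pyGet? links i with
    | none => none
    | some childrens =>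
      if childrens.length = 0 then some 1
      else
        match childrens.foldlM
            (fun (st : Option (Int × Int)) child =>
              (dfsFuel links fuel child).map (aUpd st))
            none with
        | some (some (mx, mn)) => some (mn + mx + 1)
        | _ => none

def dfs (currentIndex : Int) (links : List (List Int)) : Int :=
  (dfsFuel links (links.length + 1) currentIndex).getD 0

-- ===== PORT B =====
-- Source B's inner 'value(i)', totalised with fuel (a guard only; under Pre_ the fuel
-- links.length + 1 is never exhausted): on a memo miss, recurse over links[i]
-- threading the memo and collecting the child values, then record and return
-- min(vals) + max(vals) + 1 (or 1 if vals is empty)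
def bVal (links : List (List Int)) : Nat → PySem.Dict Int Int → Int → Option (PySem.Dict Int Int × Int)
  | 0, _, _ => none
  | fuel+1, memo, i =>
    match memo.get? i with
    | some v => some (memo, v)
    | none =>
      match PySem.List.pyGet? links i with
      | none => none
      | some cs =>
        match cs.foldlM
            (fun (st : PySem.Dict Int Int × List Int) c =>
              (bVal links fuel st.1 c).map (fun r => (r.1, st.2 ++ [r.2])))
            (memo, []) with
        | none => none
        | some (m1, vals) =>
          let v := if vals ≠ [] then
              ((PySem.List.min? vals (fun x => x)).getD 0)
                + ((PySem.List.max? vals (fun x => x)).getD 0) + 1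
            else 1
          some (m1.insert i v, v)

def dfs_alt (currentIndex : Int) (links : List (List Int)) : Int :=
  ((bVal links (links.length + 1) PySem.Dict.empty currentIndex).map (fun r => r.2)).getD 0

-- ===== PRECONDITION & SPEC =====
-- goodN links k i: every descendant chain starting at index i stays inside the list
-- (Python's [-n, n) indexing) and dies out within k steps
def goodN (links : List (List Int)) : Nat → Int → Bool
  | 0, _ => false
  | k+1, i =>
    match PySem.List.pyGet? links i with
    | none => false
    | some cs => cs.all (fun c => goodN links k c)

-- Pre_: currentIndex lies in the well-founded, in-range part of the child graph (chains of
-- length > links.length would revisit a row, i.e. cycle) — exactly the inputs on which A's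
-- recursion returns instead of raising IndexError or recursing forever.
def Pre_dfs (currentIndex : Int) (links : List (List Int)) : Prop :=
  goodN links links.length currentIndex = true
instance (currentIndex : Int) (links : List (List Int)) : Decidable (Pre_dfs currentIndex links) := by
  unfold Pre_dfs; infer_instance
def pvWitness_dfs : Int × List (List Int) := (0, [[1, 2], [2], []])
def Spec_dfs (currentIndex : Int) (links : List (List Int)) (out : Int) : Prop := out = dfs_alt currentIndex links
instance (currentIndex : Int) (links : List (List Int)) (out : Int) : Decidable (Spec_dfs currentIndex links out) := by unfold Spec_dfs; infer_instance

-- ===== CLAIM (what is proved, stated in full; the proofs are below) =====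
def Claim_equal_dfs : Prop := ∀ (currentIndex : Int) (links : List (List Int)), Dom_dfs currentIndex links → Pre_dfs currentIndex links → Spec_dfs currentIndex links (dfs currentIndex links)

-- ===== LEMMAS AND PROOFS =====

theorem dfsFuel_succ (links : List (List Int)) (m : Nat) (i : Int) :
    dfsFuel links (m+1) i =
      match PySem.List.pyGet? links i with
      | none => none
      | some childrens =>
        if childrens.length = 0 then some 1
        else
          match childrens.foldlM
              (fun (st : Option (Int × Int)) child =>
                (dfsFuel links m child).map (aUpd st)) none with
          | some (some (mx, mn)) => some (mn + mx + 1)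
          | _ => none := rfl

theorem goodN_succ (links : List (List Int)) (k : Nat) (i : Int) :
    goodN links (k+1) i =
      match PySem.List.pyGet? links i with
      | none => false
      | some cs => cs.all (fun c => goodN links k c) := rfl

theorem pairLoop (vs : List Int) : ∀ (mx mn : Int),
    vs.foldl aUpd (some (mx, mn)) = some (vs.foldl max mx, vs.foldl min mn) := by
  induction vs with
  | nil => intro mx mn; rfl
  | cons v t ih => intro mx mn; simp [List.foldl, aUpd, ih]

theorem pairLoop_cons (v : Int) (t : List Int) :
    (v :: t).foldl aUpd none = some (t.foldl max v, t.foldl min v) := by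
  simp [List.foldl, aUpd, pairLoop]

theorem foldlM_map_some {σ : Type} (upd : σ → Int → σ) (g : Int → Option Int) (f : Int → Int) :
    ∀ (cs : List Int), (∀ c ∈ cs, g c = some (f c)) → ∀ st : σ,
      List.foldlM (fun st child => (g child).map (upd st)) st cs
        = some (cs.foldl (fun st c => upd st (f c)) st) := by
  intro cs
  induction cs with
  | nil => intro _ st; rfl
  | cons c t ih =>
    intro h st
    have hc : g c = some (f c) := h c (List.mem_cons_self)
    simp [List.foldlM, hc, Option.bind]
    exact ih (fun x hx => h x (List.mem_cons_of_mem _ hx)) _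

-- fuel monotonicity
theorem dfsFuel_mono (links : List (List Int)) :
    ∀ (m m' : Nat) (i : Int) (v : Int), m ≤ m' → dfsFuel links m i = some v →
      dfsFuel links m' i = some v := by
  intro m
  induction m with
  | zero => intro m' i v _ h; simp [dfsFuel] at h
  | succ m ih =>
    intro m' i v hle h
    obtain ⟨m'', rfl⟩ : ∃ m'', m' = m'' + 1 := ⟨m' - 1, by omega⟩
    rw [dfsFuel_succ] at h ⊢
    cases hg : PySem.List.pyGet? links i with
    | none => rw [hg] at h; simp at h
    | some cs =>
      rw [hg] at h
      by_cases hcs : cs.length = 0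
      · simpa [hcs] using h
      · simp only [hcs, if_false] at h ⊢
        have key : ∀ (l : List Int) (st r : Option (Int × Int)),
            List.foldlM (fun st child => (dfsFuel links m child).map (aUpd st)) st l = some r →
            List.foldlM (fun st child => (dfsFuel links m'' child).map (aUpd st)) st l = some r := by
          intro l
          induction l with
          | nil => intro st r h; exact h
          | cons c t iht =>
            intro st r h
            rw [List.foldlM_cons] at h ⊢
            cases hc : dfsFuel links m c with
            | none => rw [hc] at h; simp at h
            | some w =>
              rw [hc] at h
              rw [ih m'' c w (by omega) hc]
              exact iht _ _ h
        cases hf : List.foldlM (fun st child => (dfsFuel links m child).map (aUpd st)) none cs with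
        | none => rw [hf] at h; simp at h
        | some st =>
          rw [hf] at h
          rw [key cs none st hf]
          exact h

-- fuel k suffices on the k-good part
theorem dfsFuel_suff (links : List (List Int)) :
    ∀ (k : Nat) (i : Int), goodN links k i = true → (dfsFuel links k i).isSome := by
  intro k
  induction k with
  | zero => intro i h; simp [goodN] at h
  | succ k ih =>
    intro i h
    rw [goodN_succ] at h
    rw [dfsFuel_succ]
    cases hg : PySem.List.pyGet? links i with
    | none => rw [hg] at h; simp at h
    | some cs =>
      rw [hg] at h
      by_cases hcs : cs.length = 0
      · simp [hcs]
      · simp only [hcs, if_false]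
        simp only [List.all_eq_true] at h
        have hchild : ∀ c ∈ cs, dfsFuel links k c = some ((dfsFuel links k c).getD 0) := by
          intro c hc
          obtain ⟨w, hw⟩ := Option.isSome_iff_exists.mp (ih c (h c hc))
          rw [hw]; rfl
        rw [foldlM_map_some aUpd (dfsFuel links k) (fun c => (dfsFuel links k c).getD 0) cs hchild none]
        obtain ⟨c, t, hct⟩ : ∃ c t, cs = c :: t := by
          cases hc : cs with
          | nil => rw [hc] at hcs; simp at hcs
          | cons a b => exact ⟨a, b, rfl⟩
        rw [hct, ← List.foldl_map, List.map_cons, pairLoop_cons]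
        rfl

-- every memo entry holds A's value at its key
def MemoOK (links : List (List Int)) (m : PySem.Dict Int Int) : Prop :=
  ∀ (j : Int) (v : Int), m.get? j = some v → dfsFuel links (links.length + 1) j = some v

-- main invariant: on a k-good node with a sound memo, B's value(i) returns, keeps the
-- memo sound, only extends it, and produces A's value
theorem bVal_ok (links : List (List Int)) :
    ∀ (k : Nat), k ≤ links.length + 1 → ∀ (i : Int) (memo : PySem.Dict Int Int),
      goodN links k i = true → MemoOK links memo →
      ∃ memo' v, bVal links k memo i = some (memo', v) ∧ MemoOK links memo' ∧
        (∀ x w, memo.get? x = some w → memo'.get? x = some w) ∧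
        dfsFuel links (links.length + 1) i = some v := by
  intro k
  induction k with
  | zero => intro _ i memo h _; simp [goodN] at h
  | succ k ih =>
    intro hk i memo hgood hmemo
    rw [goodN_succ] at hgood
    cases hmi : memo.get? i with
    | some v =>
      exact ⟨memo, v, by simp [bVal, hmi], hmemo, fun _ _ h => h, hmemo i v hmi⟩
    | none =>
      cases hg : PySem.List.pyGet? links i with
      | none => rw [hg] at hgood; simp at hgood
      | some cs =>
        rw [hg] at hgood
        simp only [List.all_eq_true] at hgood
        -- the children fold: threads the memo, collects the children's A-values
        have fold : ∀ (l : List Int), (∀ c ∈ l, goodN links k c = true) →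
            ∀ (m : PySem.Dict Int Int) (acc : List Int), MemoOK links m →
            ∃ m', List.foldlM
                (fun (st : PySem.Dict Int Int × List Int) c =>
                  (bVal links k st.1 c).map (fun r => (r.1, st.2 ++ [r.2])))
                (m, acc) l
              = some (m', acc ++ l.map (fun c => (dfsFuel links (links.length + 1) c).getD 0))
              ∧ MemoOK links m' ∧ (∀ x w, m.get? x = some w → m'.get? x = some w) := by
          intro l
          induction l with
          | nil => intro _ m acc hm; exact ⟨m, by simp, hm, fun _ _ h => h⟩
          | cons c t iht =>
            intro hl m acc hm
            obtain ⟨m1, v1, hb, hm1, hext1, hA1⟩ :=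
              ih (by omega) c m (hl c (List.mem_cons_self)) hm
            obtain ⟨m', hfold, hm', hext'⟩ :=
              iht (fun x hx => hl x (List.mem_cons_of_mem _ hx)) m1 (acc ++ [v1]) hm1
            refine ⟨m', ?_, hm', fun x w hx => hext' x w (hext1 x w hx)⟩
            rw [List.foldlM_cons, hb]
            simp only [Option.map_some, Option.bind_eq_bind, Option.bind_some]
            rw [hfold]
            simp [hA1]
        obtain ⟨m', hfold, hm', hext'⟩ :=
          fold cs (fun c hc => hgood c hc) memo [] hmemo
        -- A's value at i
        have hchild : ∀ c ∈ cs,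
            dfsFuel links links.length c
              = some ((dfsFuel links (links.length + 1) c).getD 0) := by
          intro c hc
          obtain ⟨w, hw⟩ := Option.isSome_iff_exists.mp (dfsFuel_suff links k c (hgood c hc))
          have e1 : dfsFuel links links.length c = some w :=
            dfsFuel_mono links k links.length c w (by omega) hw
          have e2 : dfsFuel links (links.length + 1) c = some w :=
            dfsFuel_mono links k (links.length + 1) c w (by omega) hw
          rw [e1, e2]
          rfl
        set vals := cs.map (fun c => (dfsFuel links (links.length + 1) c).getD 0) with hvals
        set v : Int := if vals ≠ [] then
            ((PySem.List.min? vals (fun x => x)).getD 0)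
              + ((PySem.List.max? vals (fun x => x)).getD 0) + 1
          else 1 with hv
        have hAi : dfsFuel links (links.length + 1) i = some v := by
          rw [dfsFuel_succ, hg]
          by_cases hcs : cs.length = 0
          · have : cs = [] := List.length_eq_zero_iff.mp hcs
            subst this
            simp [hv, hvals]
          · simp only [hcs, if_false]
            rw [foldlM_map_some aUpd (dfsFuel links links.length)
              (fun c => (dfsFuel links (links.length + 1) c).getD 0) cs hchild none]
            obtain ⟨c, t, hct⟩ : ∃ c t, cs = c :: t := by
              cases hc : cs with
              | nil => rw [hc] at hcs; simp at hcs
              | cons a b => exact ⟨a, b, rfl⟩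
            rw [hct, ← List.foldl_map, List.map_cons, pairLoop_cons]
            simp [hv, hvals, hct, PySem.List.min?_id_cons, PySem.List.max?_id_cons,
              List.foldl_map]
        refine ⟨m'.insert i v, v, ?_, ?_, ?_, hAi⟩
        · show bVal links (k+1) memo i = _
          simp only [bVal, hmi, hg]
          rw [hfold]
          simp [hv]
        · intro j w hj
          by_cases hji : j = i
          · subst hji
            rw [PySem.Dict.get?_insert_self] at hj
            obtain rfl : v = w := by simpa using hj
            exact hAi
          · rw [PySem.Dict.get?_insert_of_ne m' _ hji] at hj
            exact hm' j w hj
        · intro x w hx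
          by_cases hxi : x = i
          · subst hxi; rw [hmi] at hx; exact absurd hx (by simp)
          · rw [PySem.Dict.get?_insert_of_ne m' _ hxi]
            exact hext' x w hx

-- ===== VERDICT (by name: the statement is the Claim_ definition above) =====
theorem dfs_spec : Claim_equal_dfs := by
  intro c links _ hPre
  unfold Pre_dfs at hPre
  unfold Spec_dfs dfs dfs_alt
  have hgood : goodN links (links.length + 1) c = true := by
    cases hL : links.length with
    | zero => rw [hL] at hPre; simp [goodN] at hPre
    | succ n =>
      -- goodN is monotone in the fuel: unfold one level and weaken each child
      have mono : ∀ (k : Nat) (i : Int), goodN links k i = true → goodN links (k+1) i = true := by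
        intro k
        induction k with
        | zero => intro i h; simp [goodN] at h
        | succ k ihk =>
          intro i h
          rw [goodN_succ] at h ⊢
          cases hg : PySem.List.pyGet? links i with
          | none => rw [hg] at h; simp at h
          | some cs =>
            rw [hg] at h
            show (cs.all fun x => goodN links (k+1) x) = true
            simp only [List.all_eq_true] at h ⊢
            exact fun x hx => ihk x (h x hx)
      rw [hL] at hPre
      exact mono _ c hPre
  have hempty : MemoOK links PySem.Dict.empty := by
    intro j v hj
    rw [PySem.Dict.get?_empty] at hj
    exact absurd hj (by simp)
  obtain ⟨m', v, hb, _, _, hA⟩ :=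
    bVal_ok links (links.length + 1) (by omega) c PySem.Dict.empty hgood hempty
  rw [hb, hA]
  rfl
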